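-- pv_equiv track=rewrite | github.com/tang0226/projectEuler | Solutions/357-Prime_generating_integers.py | isPgi
-- ===== SOURCE A (Python) =====
-- import math
--
-- def isPrime(n):
-- 	if n < 2:
-- 		return False
-- 	if n < 4:
-- 		return True
-- 	if n % 2 == 0 or n % 3 == 0:
-- 		return False
-- 	i = 5
-- 	while(i * i <= n):
-- 		if (n % i == 0 or n % (i + 2) == 0):
-- 			return False
-- 		i = i + 6
-- 	return True
--
-- def factorArray(num):
-- 	factors = [1, num]
-- 	for i in range(2, math.floor(math.sqrt(num)) + 1):
-- 		if num % i == 0: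
-- 			if num / i == i:
-- 				factors.append(i)
-- 			else:
-- 				factors.append(int(num / i))
-- 				factors.append(i)
-- 	factors.sort()
-- 	return factors
--
-- def isPgi(n):
-- 	if n % 10 == 6 or n % 10 == 4 or (n + 8) % 20 == 0 or n % 20 == 0 or (n - 8) % 20 == 0:
-- 		return False
-- 	if not(isPrime(n + 1)):
-- 		return False
-- 	l = len(factorArray(n))
-- 	f = factorArray(n)
-- 	valid = True
-- 	for i in range(math.floor(l / 2) + 1):
-- 		if not(isPrime(f[i] + f[l - i - 1])):
-- 			return False
-- 	return True
-- ===== SOURCE B (Python) =====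
-- def isPrime(n):
-- 	if n < 2:
-- 		return False
-- 	if n < 4:
-- 		return True
-- 	if n % 2 == 0 or n % 3 == 0:
-- 		return False
-- 	i = 5
-- 	while(i * i <= n):
-- 		if (n % i == 0 or n % (i + 2) == 0):
-- 			return False
-- 		i = i + 6
-- 	return True
--
-- def isPgi(n):
-- 	if n % 10 == 6 or n % 10 == 4 or (n + 8) % 20 == 0 or n % 20 == 0 or (n - 8) % 20 == 0:
-- 		return False
-- 	if not(isPrime(n + 1)):
-- 		return False
-- 	# one sqrt(n) pass: form each divisor-pair sum i + n//i inline,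
-- 	# no divisor list, no sort, no index pairing
-- 	i = 1
-- 	while i * i <= n:
-- 		if n % i == 0 and not isPrime(i + n // i):
-- 			return False
-- 		i += 1
-- 	return True
-- ===== Notes on version B (the rewrite author's own statement) =====
-- stated objective: simpler
-- what changed: Replaced the build-divisor-list / sort / symmetric-index pairing (factorArray called twice) with a single while loop over i = 1..sqrt(n) that tests each divisor-pair sum i + n//i inline, with no list, no sort and no indexing.
import Mathlib
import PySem

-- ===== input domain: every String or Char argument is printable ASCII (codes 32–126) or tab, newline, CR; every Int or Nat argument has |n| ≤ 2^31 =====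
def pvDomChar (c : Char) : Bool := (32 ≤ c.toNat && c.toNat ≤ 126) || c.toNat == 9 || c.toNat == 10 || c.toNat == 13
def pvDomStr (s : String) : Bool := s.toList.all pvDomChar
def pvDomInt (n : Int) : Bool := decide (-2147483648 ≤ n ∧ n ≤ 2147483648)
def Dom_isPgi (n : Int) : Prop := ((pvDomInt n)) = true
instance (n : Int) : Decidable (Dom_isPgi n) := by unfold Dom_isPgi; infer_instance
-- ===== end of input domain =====

-- B replaces A's build-divisor-list/sort/symmetric-index pairing with one inline
-- while loop over i = 1..sqrt(n) testing each divisor-pair sum i + n//i (simpler).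

-- ===== PORT A =====
-- shared helper isPrime (identical source in Source A and Source B); while loop as recursion
def isPrimeLoop (n i : Int) : Bool :=
  if h : i * i ≤ n then
    if PySem.Int.mod n i == 0 || PySem.Int.mod n (i + 2) == 0 then false
    else isPrimeLoop n (i + 6)
  else true
termination_by (n + 1 - i).toNat
decreasing_by
  have hin : i ≤ n := by nlinarith [mul_self_nonneg i]
  omega

def isPrime (n : Int) : Bool :=
  if n < 2 then false
  else if n < 4 then true
  else if PySem.Int.mod n 2 == 0 || PySem.Int.mod n 3 == 0 then false
  else isPrimeLoop n 5

-- math.floor(math.sqrt(num)) = Nat.sqrt num.toNat : exact for 0 ≤ num ≤ 2^31 (the call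
-- sites in isPgi guard num ≥ 1 via isPrime(n+1)); num/i on exact divisors = floordiv
def factorArray (num : Int) : List Int :=
  PySem.List.sorted
    ((PySem.List.pyRange 2 ((Nat.sqrt num.toNat : Int) + 1) 1).foldl
      (fun acc i =>
        if PySem.Int.mod num i == 0 then
          if PySem.Int.floordiv num i == i then acc ++ [i]
          else acc ++ [PySem.Int.floordiv num i, i]
        else acc)
      [1, num])
    (fun x => x) false

def isPgi (n : Int) : Bool :=
  if PySem.Int.mod n 10 == 6 || PySem.Int.mod n 10 == 4 || PySem.Int.mod (n + 8) 20 == 0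
      || PySem.Int.mod n 20 == 0 || PySem.Int.mod (n - 8) 20 == 0 then false
  else if !(isPrime (n + 1)) then false
  else
    let l : Int := ((factorArray n).length : Int)
    let f := factorArray n
    -- indices are provably in range here (lemmas below), so f[i] is pyGetD exactly
    (PySem.List.pyRange 0 (PySem.Int.floordiv l 2 + 1) 1).all
      (fun i => isPrime (PySem.List.pyGetD f i 0 + PySem.List.pyGetD f (l - i - 1) 0))

-- ===== PORT B =====
def altLoop (n i : Int) : Bool :=
  if h : i * i ≤ n then
    if PySem.Int.mod n i == 0 && !(isPrime (i + PySem.Int.floordiv n i)) then false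
    else altLoop n (i + 1)
  else true
termination_by (n + 1 - i).toNat
decreasing_by
  have hin : i ≤ n := by nlinarith [mul_self_nonneg i]
  omega

def isPgi_alt (n : Int) : Bool :=
  if PySem.Int.mod n 10 == 6 || PySem.Int.mod n 10 == 4 || PySem.Int.mod (n + 8) 20 == 0
      || PySem.Int.mod n 20 == 0 || PySem.Int.mod (n - 8) 20 == 0 then false
  else if !(isPrime (n + 1)) then false
  else altLoop n 1

-- ===== PRECONDITION & SPEC =====
def Spec_isPgi (n : Int) (out : Bool) : Prop := out = isPgi_alt n
instance (n : Int) (out : Bool) : Decidable (Spec_isPgi n out) := by unfold Spec_isPgi; infer_instance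

-- ===== CLAIM (what is proved, stated in full; the proofs are below) =====
def Claim_equal_isPgi : Prop := ∀ (n : Int), Dom_isPgi n → Spec_isPgi n (isPgi n)

-- ===== LEMMAS AND PROOFS =====

-- proof-side names for the pieces of factorArray's fold
def blockF (n i : Int) : List Int :=
  if PySem.Int.mod n i == 0 then
    if PySem.Int.floordiv n i == i then [i] else [PySem.Int.floordiv n i, i]
  else []

def RL (n : Int) : List Int := PySem.List.pyRange 2 ((Nat.sqrt n.toNat : Int) + 1) 1

def MF (n : Int) : List Int := [1, n] ++ (RL n).flatMap (blockF n)

theorem foldl_blocks (g : Int → List Int) (xs : List Int) (init : List Int) :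
    xs.foldl (fun acc i => acc ++ g i) init = init ++ xs.flatMap g := by
  induction xs generalizing init with
  | nil => simp
  | cons x xs ih => simp [ih, List.append_assoc]

theorem fa_eq (n : Int) :
    factorArray n = PySem.List.sorted (MF n) (fun x => x) false := by
  unfold factorArray MF RL
  congr 1
  have hb : (fun (acc : List Int) i =>
      if PySem.Int.mod n i == 0 then
        if PySem.Int.floordiv n i == i then acc ++ [i]
        else acc ++ [PySem.Int.floordiv n i, i]
      else acc) = fun acc i => acc ++ blockF n i := by
    funext acc i; unfold blockF; split_ifs <;> simp
  rw [hb, foldl_blocks]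

theorem flatMap_perm (l : List Int) (g h : Int → List Int)
    (H : ∀ x ∈ l, (g x).Perm (h x)) : (l.flatMap g).Perm (l.flatMap h) := by
  induction l with
  | nil => simp
  | cons x xs ih =>
      simp only [List.flatMap_cons]
      exact (H x (by simp)).append (ih (fun y hy => H y (by simp [hy])))

theorem ediv_pos_of_dvd {n d : Int} (hn : 1 ≤ n) (hd : 1 ≤ d) (h : d ∣ n) : 1 ≤ n / d := by
  obtain ⟨c, rfl⟩ := h
  rw [Int.mul_ediv_cancel_left c (by omega)]
  nlinarith

theorem ediv_dvd_of_dvd {n d : Int} (hd : 1 ≤ d) (h : d ∣ n) : n / d ∣ n := by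
  obtain ⟨c, rfl⟩ := h
  rw [Int.mul_ediv_cancel_left c (by omega)]
  exact ⟨d, mul_comm d c⟩

theorem ediv_ediv_self {n d : Int} (hn : 1 ≤ n) (hd : 1 ≤ d) (h : d ∣ n) : n / (n / d) = d := by
  obtain ⟨c, rfl⟩ := h
  have hc : 1 ≤ c := by nlinarith
  rw [Int.mul_ediv_cancel_left c (by omega), mul_comm, Int.mul_ediv_cancel_left d (by omega)]

theorem ediv_anti {n a b : Int} (hn : 0 ≤ n) (ha : 0 < a) (hab : a ≤ b) : n / b ≤ n / a := by
  have hb : 0 < b := lt_of_lt_of_le ha hab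
  rw [Int.le_ediv_iff_mul_le ha]
  calc n / b * a ≤ n / b * b := by
        have : 0 ≤ n / b := Int.ediv_nonneg hn hb.le
        exact mul_le_mul_of_nonneg_left hab this
    _ ≤ n := Int.ediv_mul_le n hb.ne'

theorem mem_RL {n i : Int} (hn : 1 ≤ n) : i ∈ RL n ↔ 2 ≤ i ∧ i * i ≤ n := by
  unfold RL
  rw [PySem.List.mem_pyRange_one]
  have hcast : ((n.toNat : Int)) = n := Int.toNat_of_nonneg (by omega)
  constructor
  · rintro ⟨h2, hlt⟩
    refine ⟨h2, ?_⟩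
    have hnat : i.toNat ≤ Nat.sqrt n.toNat := by omega
    have h1 : i.toNat * i.toNat ≤ Nat.sqrt n.toNat * Nat.sqrt n.toNat :=
      Nat.mul_le_mul hnat hnat
    have h2' : Nat.sqrt n.toNat * Nat.sqrt n.toNat ≤ n.toNat := Nat.sqrt_le n.toNat
    have hi : ((i.toNat : Int)) = i := Int.toNat_of_nonneg (by omega)
    calc i * i = ((i.toNat * i.toNat : Nat) : Int) := by push_cast [hi]; ring
      _ ≤ ((n.toNat : Int)) := by exact_mod_cast le_trans h1 h2'
      _ = n := hcast
  · rintro ⟨h2, hsq⟩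
    refine ⟨h2, ?_⟩
    have hi : ((i.toNat : Int)) = i := Int.toNat_of_nonneg (by omega)
    have hnat : i.toNat * i.toNat ≤ n.toNat := by
      have : ((i.toNat * i.toNat : Nat) : Int) ≤ ((n.toNat : Int)) := by
        push_cast [hi, hcast]; nlinarith
      exact_mod_cast this
    have := Nat.le_sqrt.mpr hnat
    omega

theorem mem_blockF {n i d : Int} (hn : 1 ≤ n) (h2 : 2 ≤ i) :
    d ∈ blockF n i ↔ i ∣ n ∧ (d = n / i ∨ d = i) := by
  unfold blockF
  by_cases hdvd : i ∣ n
  · rw [if_pos (by rw [beq_iff_eq, PySem.Int.mod_eq_zero_iff_dvd]; exact hdvd)]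
    rw [PySem.Int.floordiv_eq_ediv_of_pos (by omega : (0:Int) < i)]
    by_cases hsq : n / i = i
    · rw [if_pos (beq_iff_eq.mpr hsq)]
      simp only [List.mem_singleton, hsq]
      constructor
      · rintro rfl; exact ⟨hdvd, Or.inr rfl⟩
      · rintro ⟨_, rfl | rfl⟩ <;> rfl
    · rw [if_neg (by simp [beq_iff_eq, hsq])]
      simp only [List.mem_cons, List.not_mem_nil, or_false]
      tauto
  · rw [if_neg (by simp [beq_iff_eq, PySem.Int.mod_eq_zero_iff_dvd, hdvd])]
    simp [hdvd]

theorem mem_MF_divisor {n d : Int} (hn : 1 ≤ n) (hd : d ∈ MF n) : d ∣ n ∧ 1 ≤ d := by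
  unfold MF at hd
  simp only [List.mem_append, List.mem_cons, List.mem_flatMap, List.not_mem_nil, or_false] at hd
  rcases hd with (rfl | rfl) | ⟨i, hiR, hdB⟩
  · exact ⟨one_dvd n, le_refl 1⟩
  · exact ⟨dvd_refl d, hn⟩
  · obtain ⟨h2, hsq⟩ := (mem_RL hn).mp hiR
    obtain ⟨hdvd, hcases⟩ := (mem_blockF hn h2).mp hdB
    rcases hcases with rfl | rfl
    · exact ⟨ediv_dvd_of_dvd (by omega) hdvd, ediv_pos_of_dvd hn (by omega) hdvd⟩
    · exact ⟨hdvd, by omega⟩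

theorem divisor_mem_MF {n d : Int} (hn : 1 ≤ n) (hdvd : d ∣ n) (h1 : 1 ≤ d) : d ∈ MF n := by
  have hdn : d ≤ n := Int.le_of_dvd (by omega) hdvd
  unfold MF
  simp only [List.mem_append, List.mem_cons, List.mem_flatMap, List.not_mem_nil, or_false]
  by_cases he1 : d = 1
  · exact Or.inl (Or.inl he1)
  by_cases hen : d = n
  · exact Or.inl (Or.inr hen)
  have h2 : 2 ≤ d := by omega
  have hdn' : d < n := lt_of_le_of_ne hdn hen
  by_cases hsq : d * d ≤ n
  · refine Or.inr ⟨d, (mem_RL hn).mpr ⟨h2, hsq⟩, ?_⟩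
    rw [mem_blockF hn h2]
    exact ⟨hdvd, Or.inr rfl⟩
  · obtain ⟨c, hc⟩ := hdvd
    have hc1 : 1 ≤ c := by nlinarith
    have hcd : c < d := by nlinarith
    have hc2 : 2 ≤ c := by
      rcases (by omega : c = 1 ∨ 2 ≤ c) with h | h
      · exfalso; rw [h, mul_one] at hc; omega
      · exact h
    have hcsq : c * c ≤ n := by nlinarith
    have hcdvd : c ∣ n := ⟨d, by rw [hc]; ring⟩
    refine Or.inr ⟨c, (mem_RL hn).mpr ⟨hc2, hcsq⟩, ?_⟩
    rw [mem_blockF hn hc2]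
    have hnc : n / c = d := by rw [hc, mul_comm, Int.mul_ediv_cancel_left d (by omega)]
    exact ⟨hcdvd, Or.inl hnc.symm⟩

theorem map_q_perm {n : Int} (hn : 1 ≤ n) :
    ((MF n).map (fun d => n / d)).Perm (MF n) := by
  unfold MF
  rw [List.map_append, List.map_flatMap]
  have h1 : List.map (fun d => n / d) [1, n] = [n, 1] := by
    simp [Int.ediv_self (by omega : n ≠ 0)]
  rw [h1]
  have h2 : ((RL n).flatMap (fun i => (blockF n i).map (fun d => n / d))).Perm
      ((RL n).flatMap (blockF n)) := by
    apply flatMap_perm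
    intro i hi
    obtain ⟨h2i, hsq⟩ := (mem_RL hn).mp hi
    unfold blockF
    by_cases hdvd : i ∣ n
    · rw [if_pos (by rw [beq_iff_eq, PySem.Int.mod_eq_zero_iff_dvd]; exact hdvd)]
      rw [PySem.Int.floordiv_eq_ediv_of_pos (by omega : (0:Int) < i)]
      have hqq : n / (n / i) = i := ediv_ediv_self hn (by omega) hdvd
      by_cases hsqr : n / i = i
      · rw [if_pos (beq_iff_eq.mpr hsqr)]
        simp [hsqr]
      · rw [if_neg (by simp [beq_iff_eq, hsqr])]
        simp only [List.map_cons, List.map_nil, hqq]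
        exact List.Perm.swap (n / i) i []
    · rw [if_neg (by simp [beq_iff_eq, PySem.Int.mod_eq_zero_iff_dvd, hdvd])]
      simp
  exact (List.Perm.swap 1 n []).append h2

theorem fa_perm {n : Int} : (factorArray n).Perm (MF n) := by
  rw [fa_eq n]; exact PySem.List.sorted_perm _ _ _

theorem fa_len {n : Int} : 2 ≤ (factorArray n).length := by
  rw [fa_eq n, PySem.List.length_sorted]
  unfold MF; simp

theorem mirror {n : Int} (hn : 1 ≤ n) :
    factorArray n = ((factorArray n).map (fun d => n / d)).reverse := by
  have hpos : ∀ d ∈ factorArray n, 1 ≤ d := fun d hd =>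
    (mem_MF_divisor hn (fa_perm.subset hd)).2
  have hsort : (factorArray n).Pairwise (fun a b : Int => a ≤ b) := by
    rw [fa_eq n]; exact PySem.List.sorted_pairwise _ _
  have hanti : ((factorArray n).map (fun d => n / d)).Pairwise (fun a b : Int => b ≤ a) := by
    rw [List.pairwise_map]
    refine List.Pairwise.imp_of_mem ?_ hsort
    intro a b ha hb hab
    exact ediv_anti (by omega) (by have := hpos a ha; omega) hab
  have hrev : (((factorArray n).map (fun d => n / d)).reverse).Pairwise
      (fun a b : Int => a ≤ b) := by
    rw [List.pairwise_reverse]; exact hanti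
  have hpermr : (((factorArray n).map (fun d => n / d)).reverse).Perm (MF n) :=
    (((factorArray n).map (fun d => n / d)).reverse_perm).trans
      ((fa_perm.map _).trans (map_q_perm hn))
  conv_lhs => rw [fa_eq n]
  exact PySem.List.sorted_id_eq_of_perm_of_pairwise _ _ hpermr hrev

theorem mirror_get {n : Int} (hn : 1 ≤ n) (j : Nat) (hj : j < (factorArray n).length) :
    (factorArray n)[(factorArray n).length - 1 - j]'(by omega) =
      n / (factorArray n)[j] := by
  rw [List.getElem_of_eq (mirror hn), List.getElem_reverse, List.getElem_map]
  have hidx : ((factorArray n).map (fun d => n / d)).length - 1 -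
      ((factorArray n).length - 1 - j) = j := by
    simp only [List.length_map]; omega
  simp only [hidx]

def Pfd (n d : Int) : Prop := isPrime (d + n / d) = true

theorem pairs_iff {n : Int} (hn : 1 ≤ n) :
    ((PySem.List.pyRange 0
        (PySem.Int.floordiv ((factorArray n).length : Int) 2 + 1) 1).all
      (fun i => isPrime (PySem.List.pyGetD (factorArray n) i 0 +
        PySem.List.pyGetD (factorArray n) (((factorArray n).length : Int) - i - 1) 0)) = true)
    ↔ (∀ d ∈ factorArray n, Pfd n d) := by
  have hL2 : 2 ≤ (factorArray n).length := fa_len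
  have hfd : PySem.Int.floordiv ((factorArray n).length : Int) 2 =
      ((factorArray n).length : Int) / 2 :=
    PySem.Int.floordiv_eq_ediv_of_pos (by omega)
  rw [List.all_eq_true]
  constructor
  · intro h d hd
    obtain ⟨j, hj, rfl⟩ := List.mem_iff_getElem.mp hd
    by_cases hhalf : (j : Int) ≤ ((factorArray n).length : Int) / 2
    · have hmem : ((j : Int)) ∈ PySem.List.pyRange 0
          (PySem.Int.floordiv ((factorArray n).length : Int) 2 + 1) 1 :=
        PySem.List.mem_pyRange_one.mpr ⟨by omega, by rw [hfd]; omega⟩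
      have hh := h _ hmem
      rw [PySem.List.pyGetD_eq_getElem _ 0 (by omega) (by push_cast; omega),
          PySem.List.pyGetD_eq_getElem _ 0 (by push_cast; omega) (by push_cast; omega)] at hh
      have e1 : ((j : Int)).toNat = j := by omega
      have e2 : (((factorArray n).length : Int) - (j : Int) - 1).toNat =
          (factorArray n).length - 1 - j := by omega
      simp only [e1, e2] at hh
      rw [mirror_get hn j hj] at hh
      exact hh
    · have hj' : (factorArray n).length - 1 - j < (factorArray n).length := by omega
      have hmem : (((factorArray n).length - 1 - j : Nat) : Int) ∈ PySem.List.pyRange 0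
          (PySem.Int.floordiv ((factorArray n).length : Int) 2 + 1) 1 :=
        PySem.List.mem_pyRange_one.mpr ⟨by omega, by rw [hfd]; push_cast; omega⟩
      have hh := h _ hmem
      rw [PySem.List.pyGetD_eq_getElem _ 0 (by omega) (by push_cast; omega),
          PySem.List.pyGetD_eq_getElem _ 0 (by push_cast; omega) (by push_cast; omega)] at hh
      have e1 : ((((factorArray n).length - 1 - j : Nat) : Int)).toNat =
          (factorArray n).length - 1 - j := by omega
      have e2 : (((factorArray n).length : Int) -
          (((factorArray n).length - 1 - j : Nat) : Int) - 1).toNat = j := by omega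
      simp only [e1, e2] at hh
      rw [mirror_get hn j hj] at hh
      unfold Pfd
      rw [Int.add_comm] at hh
      exact hh
  · intro h i hi
    obtain ⟨h0, hlt⟩ := PySem.List.mem_pyRange_one.mp hi
    rw [hfd] at hlt
    have hjL : i.toNat < (factorArray n).length := by omega
    rw [PySem.List.pyGetD_eq_getElem _ 0 h0 (by omega),
        PySem.List.pyGetD_eq_getElem _ 0 (by omega) (by omega)]
    have e2 : (((factorArray n).length : Int) - i - 1).toNat =
        (factorArray n).length - 1 - i.toNat := by omega
    simp only [e2]
    rw [mirror_get hn i.toNat hjL]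
    exact h _ (List.getElem_mem hjL)

theorem bridge {n : Int} (hn : 1 ≤ n) :
    (∀ d ∈ factorArray n, Pfd n d) ↔
    (∀ d : Int, 1 ≤ d → d * d ≤ n → d ∣ n → Pfd n d) := by
  constructor
  · intro h d h1 _ hdvd
    exact h d (fa_perm.mem_iff.mpr (divisor_mem_MF hn hdvd h1))
  · intro h d hd
    obtain ⟨hdvd, h1⟩ := mem_MF_divisor hn (fa_perm.subset hd)
    by_cases hsq : d * d ≤ n
    · exact h d h1 hsq hdvd
    · obtain ⟨c, hc⟩ := hdvd
      have hc1 : 1 ≤ c := by nlinarith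
      have hcd : c < d := by nlinarith
      have hcsq : c * c ≤ n := by nlinarith
      have hcdvd : c ∣ n := ⟨d, by rw [hc]; ring⟩
      have hnc : n / c = d := by rw [hc, mul_comm, Int.mul_ediv_cancel_left d (by omega)]
      have hnd : n / d = c := by rw [hc, Int.mul_ediv_cancel_left c (by omega)]
      have hh := h c hc1 hcsq hcdvd
      unfold Pfd at hh ⊢
      rw [hnd, Int.add_comm, ← hnc]
      exact hh

theorem altLoop_spec (n i : Int) (hi : 1 ≤ i) :
    altLoop n i = true ↔
    (∀ j : Int, i ≤ j → j * j ≤ n →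
      PySem.Int.mod n j = 0 → isPrime (j + PySem.Int.floordiv n j) = true) := by
  rw [altLoop]
  split_ifs with hle hc
  · constructor
    · intro h; exact absurd h (by simp)
    · intro hall
      rw [Bool.and_eq_true, beq_iff_eq, Bool.not_eq_true'] at hc
      have := hall i le_rfl hle hc.1
      simp [hc.2] at this
  · have ih := altLoop_spec n (i + 1) (by omega)
    rw [ih]
    constructor
    · intro h j hij hj hm
      rcases eq_or_lt_of_le hij with heq | hlt
      · subst heq
        rw [Bool.and_eq_true, beq_iff_eq, Bool.not_eq_true'] at hc
        rcases Bool.eq_false_or_eq_true (isPrime (i + PySem.Int.floordiv n i)) with ht | hf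
        · exact ht
        · exact absurd ⟨hm, hf⟩ hc
      · exact h j (by omega) hj hm
    · intro h j hij hj hm
      exact h j (by omega) hj hm
  · constructor
    · intro _ j hij hj _
      exfalso
      have : i * i ≤ j * j := by nlinarith
      omega
    · intro _; rfl
termination_by (n + 1 - i).toNat
decreasing_by
  have : i ≤ n := by nlinarith [mul_self_nonneg i]
  omega

theorem main_eq (n : Int) (hn : 1 ≤ n) :
    (let l : Int := ((factorArray n).length : Int)
     let f := factorArray n
     (PySem.List.pyRange 0 (PySem.Int.floordiv l 2 + 1) 1).all
       (fun i => isPrime (PySem.List.pyGetD f i 0 + PySem.List.pyGetD f (l - i - 1) 0)))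
    = altLoop n 1 := by
  rw [Bool.eq_iff_iff]
  show ((PySem.List.pyRange 0
        (PySem.Int.floordiv ((factorArray n).length : Int) 2 + 1) 1).all
      (fun i => isPrime (PySem.List.pyGetD (factorArray n) i 0 +
        PySem.List.pyGetD (factorArray n) (((factorArray n).length : Int) - i - 1) 0)) = true)
    ↔ altLoop n 1 = true
  rw [pairs_iff hn, bridge hn, altLoop_spec n 1 le_rfl]
  constructor
  · intro h j h1j hj hm
    have hd : j ∣ n := (PySem.Int.mod_eq_zero_iff_dvd n j).mp hm
    have hh := h j h1j hj hd
    unfold Pfd at hh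
    rw [PySem.Int.floordiv_eq_ediv_of_pos (by omega : (0:Int) < j)]
    exact hh
  · intro h d h1 hsq hdvd
    unfold Pfd
    have hh := h d h1 hsq ((PySem.Int.mod_eq_zero_iff_dvd n d).mpr hdvd)
    rw [PySem.Int.floordiv_eq_ediv_of_pos (by omega : (0:Int) < d)] at hh
    exact hh

theorem isPrime_two_le {m : Int} (h : isPrime m = true) : 2 ≤ m := by
  unfold isPrime at h
  split_ifs at h with h1 <;> omega

-- ===== VERDICT (by name: the statement is the Claim_ definition above) =====
theorem isPgi_spec : Claim_equal_isPgi := by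
  intro n _
  unfold Spec_isPgi isPgi isPgi_alt
  split_ifs with h1 h2
  · rfl
  · rfl
  · have hp : isPrime (n + 1) = true := by
      cases hh : isPrime (n + 1) <;> simp [hh] at h2 ⊢
    have hn : 1 ≤ n := by have := isPrime_two_le hp; omega
    exact main_eq n hn
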